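-- pv_equiv track=rewrite | github.com/jamesHargreaves12/spokenProgramming | ibm_models.py | _extract_phrase
-- ===== SOURCE A (Python) =====
-- def _extract_phrase(e_start, e_end, f_start, f_end, alignment, f_len):
--     if f_end is -1:
--         return []
--     for f, e in alignment:
--         if f_start <= f <= f_end and (e < e_start or e > e_end):
--             return []
--     f_aligned = [j for j,_ in alignment]
--     phrases = []
--     fs = f_start
--     min_fs = 0
--     while True:
--         fe = f_end
--         while True:
--             phrases.append((e_start,e_end,fs,fe))
--             fe += 1
--             if fe in f_aligned or fe >= f_len:
--                 break
--         fs -= 1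
--         if fs in f_aligned or fs < min_fs:
--             break
--     return phrases
-- ===== SOURCE B (Python) =====
-- def _extract_phrase(e_start, e_end, f_start, f_end, alignment, f_len):
--     if f_end is -1:
--         return []
--     # One pass over the alignment: check consistency and simultaneously compute
--     # the extremal aligned neighbours of the [f_start, f_end] window.
--     lo_cap = 0            # max(0, f+1) over aligned f left of f_start
--     hi_cap = f_len - 1    # min(f_len-1, f-1) over aligned f right of f_end
--     for f, e in alignment:
--         if f_start <= f <= f_end and (e < e_start or e > e_end):
--             return []
--         if f < f_start and f + 1 > lo_cap:
--             lo_cap = f + 1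
--         if f > f_end and f - 1 < hi_cap:
--             hi_cap = f - 1
--     fs_min = f_start if f_start <= 0 else lo_cap
--     fe_max = f_end if f_end + 1 >= f_len else hi_cap
--     return [(e_start, e_end, fs, fe)
--             for fs in range(f_start, fs_min - 1, -1)
--             for fe in range(f_end, fe_max + 1)]
-- ===== Notes on version B (the rewrite author's own statement) =====
-- stated objective: alternative
-- what changed: A expands and emits with nested while-loops that rescan the alignment list for a membership test at every step; B makes ONE pass over the alignment that checks consistency and computes the extremal aligned neighbours of the [f_start,f_end] window (max f+1 to the left, min f-1 to the right), derives the two expansion bounds in closed form from those extremes, and emits the phrase rectangle with a nested-range comprehension in A's order.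
import Mathlib
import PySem

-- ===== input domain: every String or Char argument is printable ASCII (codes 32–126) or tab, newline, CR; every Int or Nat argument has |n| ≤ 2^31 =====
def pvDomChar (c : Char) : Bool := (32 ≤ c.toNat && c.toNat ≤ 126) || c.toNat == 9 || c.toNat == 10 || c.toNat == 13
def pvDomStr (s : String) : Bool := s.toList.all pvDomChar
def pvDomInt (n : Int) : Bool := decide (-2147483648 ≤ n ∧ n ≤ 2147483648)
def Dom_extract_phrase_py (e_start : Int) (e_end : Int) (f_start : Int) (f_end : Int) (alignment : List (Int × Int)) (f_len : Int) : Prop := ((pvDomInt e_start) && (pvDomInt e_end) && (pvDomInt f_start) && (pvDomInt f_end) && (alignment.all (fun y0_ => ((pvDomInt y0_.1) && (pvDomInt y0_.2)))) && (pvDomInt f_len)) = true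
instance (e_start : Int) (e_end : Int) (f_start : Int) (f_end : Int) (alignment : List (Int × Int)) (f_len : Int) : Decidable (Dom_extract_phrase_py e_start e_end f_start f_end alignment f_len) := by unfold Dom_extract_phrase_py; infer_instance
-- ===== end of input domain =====

-- B replaces A's nested expand-and-emit while-loops (which rescan the alignment list on
-- every step) by ONE pass over the alignment that computes the extremal aligned
-- neighbours of the window, closed-form bounds, then a product emission
-- (objective: alternative). Both programs only READ their arguments.
-- The Nat fuel in A's loops is only a totality guard, chosen large enough that the
-- fuel-out branch is never reached (proved via the fuel bounds in the lemmas below).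

-- ===== PORT A =====
-- inner `while True` loop of A: append (e_start,e_end,fs,fe), fe += 1, break if fe aligned or fe >= f_len
def pvInnerA (e_start e_end fs f_len : Int) (fAligned : List Int) :
    Nat → Int → List (Int × Int × Int × Int) → List (Int × Int × Int × Int)
  | 0, _, acc => acc
  | fuel + 1, fe, acc =>
    if (fe + 1) ∈ fAligned ∨ fe + 1 ≥ f_len then acc ++ [(e_start, e_end, fs, fe)]
    else pvInnerA e_start e_end fs f_len fAligned fuel (fe + 1) (acc ++ [(e_start, e_end, fs, fe)])

-- outer `while True` loop of A: run the inner loop, fs -= 1, break if fs aligned or fs < 0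
def pvOuterA (e_start e_end f_end f_len : Int) (fAligned : List Int) (ifuel : Nat) :
    Nat → Int → List (Int × Int × Int × Int) → List (Int × Int × Int × Int)
  | 0, _, acc => acc
  | fuel + 1, fs, acc =>
    if (fs - 1) ∈ fAligned ∨ fs - 1 < 0 then pvInnerA e_start e_end fs f_len fAligned ifuel f_end acc
    else pvOuterA e_start e_end f_end f_len fAligned ifuel fuel (fs - 1)
           (pvInnerA e_start e_end fs f_len fAligned ifuel f_end acc)

def extract_phrase_py (e_start : Int) (e_end : Int) (f_start : Int) (f_end : Int) (alignment : List (Int × Int)) (f_len : Int) : List (Int × Int × Int × Int) :=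
  if f_end = -1 then []
  else if alignment.any (fun p => decide (f_start ≤ p.1 ∧ p.1 ≤ f_end ∧ (p.2 < e_start ∨ p.2 > e_end))) then []
  else
    let f_aligned := alignment.map Prod.fst
    pvOuterA e_start e_end f_end f_len f_aligned ((f_len - f_end).toNat + 1)
      (f_start.toNat + 1) f_start []

-- ===== PORT B =====
-- B's single pass over alignment: early-return none on an inconsistent pair, else
-- maintain lo_cap (max of 0 and f+1 over aligned f left of f_start) and
-- hi_cap (min of f_len-1 and f-1 over aligned f right of f_end)
def pvScanCaps (e_start e_end f_start f_end : Int) :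
    List (Int × Int) → Int → Int → Option (Int × Int)
  | [], lo, hi => some (lo, hi)
  | (f, e) :: rest, lo, hi =>
    if f_start ≤ f ∧ f ≤ f_end ∧ (e < e_start ∨ e > e_end) then none
    else pvScanCaps e_start e_end f_start f_end rest
      (if f < f_start ∧ f + 1 > lo then f + 1 else lo)
      (if f > f_end ∧ f - 1 < hi then f - 1 else hi)

def extract_phrase_py_alt (e_start : Int) (e_end : Int) (f_start : Int) (f_end : Int) (alignment : List (Int × Int)) (f_len : Int) : List (Int × Int × Int × Int) :=
  if f_end = -1 then []
  else
    match pvScanCaps e_start e_end f_start f_end alignment 0 (f_len - 1) with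
    | none => []
    | some (lo_cap, hi_cap) =>
      let fs_min := if f_start ≤ 0 then f_start else lo_cap
      let fe_max := if f_end + 1 ≥ f_len then f_end else hi_cap
      (PySem.List.pyRange f_start (fs_min - 1) (-1)).flatMap
        (fun fs => (PySem.List.pyRange f_end (fe_max + 1) 1).map (fun fe => (e_start, e_end, fs, fe)))

-- ===== PRECONDITION & SPEC =====
def Spec_extract_phrase_py (e_start : Int) (e_end : Int) (f_start : Int) (f_end : Int) (alignment : List (Int × Int)) (f_len : Int) (out : List (Int × Int × Int × Int)) : Prop := out = extract_phrase_py_alt e_start e_end f_start f_end alignment f_len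
instance (e_start : Int) (e_end : Int) (f_start : Int) (f_end : Int) (alignment : List (Int × Int)) (f_len : Int) (out : List (Int × Int × Int × Int)) : Decidable (Spec_extract_phrase_py e_start e_end f_start f_end alignment f_len out) := by unfold Spec_extract_phrase_py; infer_instance

-- ===== CLAIM (what is proved, stated in full; the proofs are below) =====
def Claim_equal_extract_phrase_py : Prop := ∀ (e_start : Int) (e_end : Int) (f_start : Int) (f_end : Int) (alignment : List (Int × Int)) (f_len : Int), Dom_extract_phrase_py e_start e_end f_start f_end alignment f_len → Spec_extract_phrase_py e_start e_end f_start f_end alignment f_len (extract_phrase_py e_start e_end f_start f_end alignment f_len)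

-- ===== LEMMAS AND PROOFS =====

-- Proof-side reference scans (A's two expansion loops, isolated from emission)
def pvScanUp (fAligned : List Int) (f_len : Int) : Nat → Int → Int
  | 0, fe => fe
  | fuel + 1, fe =>
    if fe + 1 < f_len ∧ (fe + 1) ∉ fAligned then pvScanUp fAligned f_len fuel (fe + 1) else fe

def pvScanDown (fAligned : List Int) : Nat → Int → Int
  | 0, fs => fs
  | fuel + 1, fs =>
    if fs - 1 ≥ 0 ∧ (fs - 1) ∉ fAligned then pvScanDown fAligned fuel (fs - 1) else fs

theorem pvScanUp_ge (S : List Int) (fl : Int) :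
    ∀ (fuel : Nat) (fe : Int), fe ≤ pvScanUp S fl fuel fe := by
  intro fuel
  induction fuel with
  | zero => intro fe; simp [pvScanUp]
  | succ n ih =>
    intro fe
    rw [pvScanUp]
    split
    · exact le_trans (by omega) (ih (fe + 1))
    · omega

theorem pvScanDown_le (S : List Int) :
    ∀ (fuel : Nat) (fs : Int), pvScanDown S fuel fs ≤ fs := by
  intro fuel
  induction fuel with
  | zero => intro fs; simp [pvScanDown]
  | succ n ih =>
    intro fs
    rw [pvScanDown]
    split
    · exact le_trans (ih (fs - 1)) (by omega)
    · omega

theorem pvInnerA_eq (e_start e_end : Int) (L : List Int) (f_len fs : Int) :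
    ∀ (fuel₁ fuel₂ : Nat) (fe : Int) (acc : List (Int × Int × Int × Int)),
      (f_len - fe).toNat < fuel₁ → (f_len - fe).toNat < fuel₂ →
      pvInnerA e_start e_end fs f_len L fuel₁ fe acc =
        acc ++ (PySem.List.pyRange fe (pvScanUp L f_len fuel₂ fe + 1) 1).map
          (fun k => (e_start, e_end, fs, k)) := by
  intro fuel₁
  induction fuel₁ with
  | zero => intro fuel₂ fe acc h1 h2; omega
  | succ n ih =>
    intro fuel₂ fe acc h1 h2
    cases fuel₂ with
    | zero => omega
    | succ m =>
      rw [pvInnerA]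
      by_cases h : (fe + 1) ∈ L ∨ fe + 1 ≥ f_len
      · rw [if_pos h]
        have hstop : pvScanUp L f_len (m + 1) fe = fe := by
          rw [pvScanUp]
          have : ¬(fe + 1 < f_len ∧ (fe + 1) ∉ L) := by
            rcases h with h | h
            · intro ⟨_, hn⟩; exact hn h
            · omega
          rw [if_neg this]
        rw [hstop, PySem.List.pyRange_one_singleton]
        simp
      · rw [if_neg h]
        rw [not_or] at h
        obtain ⟨hnm, hlt⟩ := h
        have hgo : fe + 1 < f_len ∧ (fe + 1) ∉ L := ⟨by omega, hnm⟩
        have hstep : pvScanUp L f_len (m + 1) fe = pvScanUp L f_len m (fe + 1) := by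
          rw [pvScanUp, if_pos hgo]
        have hge : fe + 1 ≤ pvScanUp L f_len m (fe + 1) := pvScanUp_ge L f_len m (fe + 1)
        rw [ih m (fe + 1) _ (by omega) (by omega), hstep]
        conv_rhs => rw [PySem.List.pyRange_one_cons
          (show fe < pvScanUp L f_len m (fe + 1) + 1 by omega)]
        simp

theorem pvOuterA_eq (e_start e_end f_end : Int) (L : List Int) (f_len : Int) (ifuel : Nat)
    (hif : (f_len - f_end).toNat < ifuel) :
    ∀ (fuel₁ fuel₂ : Nat) (fs : Int) (acc : List (Int × Int × Int × Int)),
      fs.toNat < fuel₁ → fs.toNat < fuel₂ →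
      pvOuterA e_start e_end f_end f_len L ifuel fuel₁ fs acc =
        acc ++ (PySem.List.pyRange fs (pvScanDown L fuel₂ fs - 1) (-1)).flatMap
          (fun j => (PySem.List.pyRange f_end (pvScanUp L f_len ifuel f_end + 1) 1).map
            (fun k => (e_start, e_end, j, k))) := by
  intro fuel₁
  induction fuel₁ with
  | zero => intro fuel₂ fs acc h1 h2; omega
  | succ n ih =>
    intro fuel₂ fs acc h1 h2
    cases fuel₂ with
    | zero => omega
    | succ m =>
      rw [pvOuterA]
      by_cases h : (fs - 1) ∈ L ∨ fs - 1 < 0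
      · rw [if_pos h]
        have hstop : pvScanDown L (m + 1) fs = fs := by
          rw [pvScanDown]
          have : ¬(fs - 1 ≥ 0 ∧ (fs - 1) ∉ L) := by
            rcases h with h | h
            · intro ⟨_, hn⟩; exact hn h
            · omega
          rw [if_neg this]
        rw [hstop, PySem.List.pyRange_neg_one_cons (by omega),
            PySem.List.pyRange_neg_one_eq_nil (by omega),
            pvInnerA_eq e_start e_end L f_len fs ifuel ifuel f_end acc hif hif]
        simp
      · rw [if_neg h]
        rw [not_or] at h
        obtain ⟨hnm, hge0⟩ := h
        have hgo : fs - 1 ≥ 0 ∧ (fs - 1) ∉ L := ⟨by omega, hnm⟩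
        have hstep : pvScanDown L (m + 1) fs = pvScanDown L m (fs - 1) := by
          rw [pvScanDown, if_pos hgo]
        have hle : pvScanDown L m (fs - 1) ≤ fs - 1 := pvScanDown_le L m (fs - 1)
        rw [ih m (fs - 1) _ (by omega) (by omega), hstep,
            pvInnerA_eq e_start e_end L f_len fs ifuel ifuel f_end acc hif hif]
        conv_rhs => rw [PySem.List.pyRange_neg_one_cons
          (show pvScanDown L m (fs - 1) - 1 < fs by omega)]
        simp

-- pvScanCaps returns none exactly on the inputs where the consistency loop fires
theorem pvScanCaps_none_iff (e_start e_end f_start f_end : Int) :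
    ∀ (al : List (Int × Int)) (lo hi : Int),
      pvScanCaps e_start e_end f_start f_end al lo hi = none ↔
        al.any (fun p => decide (f_start ≤ p.1 ∧ p.1 ≤ f_end ∧ (p.2 < e_start ∨ p.2 > e_end))) = true := by
  intro al
  induction al with
  | nil => intro lo hi; simp [pvScanCaps]
  | cons p rest ih =>
    intro lo hi
    obtain ⟨f, e⟩ := p
    rw [pvScanCaps]
    by_cases h : f_start ≤ f ∧ f ≤ f_end ∧ (e < e_start ∨ e > e_end)
    · rw [if_pos h]; simp [h]
    · rw [if_neg h]; simp [h, ih]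

-- characterisation of the two caps pvScanCaps returns
theorem pvScanCaps_char (e_start e_end f_start f_end : Int) :
    ∀ (al : List (Int × Int)) (lo hi lo' hi' : Int),
      pvScanCaps e_start e_end f_start f_end al lo hi = some (lo', hi') →
      (lo ≤ lo' ∧ (lo' = lo ∨ ∃ p ∈ al, p.1 < f_start ∧ lo' = p.1 + 1) ∧
        (∀ p ∈ al, p.1 < f_start → p.1 + 1 ≤ lo')) ∧
      (hi' ≤ hi ∧ (hi' = hi ∨ ∃ p ∈ al, p.1 > f_end ∧ hi' = p.1 - 1) ∧
        (∀ p ∈ al, p.1 > f_end → hi' ≤ p.1 - 1)) := by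
  intro al
  induction al with
  | nil =>
    intro lo hi lo' hi' h
    rw [pvScanCaps] at h
    injection h with h
    injection h with h1 h2
    subst h1; subst h2
    refine ⟨⟨le_refl _, Or.inl rfl, ?_⟩, ⟨le_refl _, Or.inl rfl, ?_⟩⟩ <;> simp
  | cons p rest ih =>
    intro lo hi lo' hi' h
    obtain ⟨f, e⟩ := p
    rw [pvScanCaps] at h
    by_cases hv : f_start ≤ f ∧ f ≤ f_end ∧ (e < e_start ∨ e > e_end)
    · rw [if_pos hv] at h; exact absurd h (by simp)
    · rw [if_neg hv] at h
      obtain ⟨⟨hlo1, hlo2, hlo3⟩, ⟨hhi1, hhi2, hhi3⟩⟩ := ih _ _ _ _ h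
      constructor
      · by_cases hc : f < f_start ∧ f + 1 > lo
        · rw [if_pos hc] at hlo1 hlo2
          refine ⟨by omega, ?_, ?_⟩
          · rcases hlo2 with h2 | ⟨q, hq, hq1, hq2⟩
            · exact Or.inr ⟨(f, e), by simp, hc.1, h2⟩
            · exact Or.inr ⟨q, by simp [hq], hq1, hq2⟩
          · intro q hq hqf
            rcases (List.mem_cons.mp hq) with h' | h'
            · subst h'; omega
            · exact hlo3 q h' hqf
        · rw [if_neg hc] at hlo1 hlo2
          refine ⟨hlo1, ?_, ?_⟩
          · rcases hlo2 with h2 | ⟨q, hq, hq1, hq2⟩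
            · exact Or.inl h2
            · exact Or.inr ⟨q, by simp [hq], hq1, hq2⟩
          · intro q hq hqf
            rcases (List.mem_cons.mp hq) with h' | h'
            · subst h'; simp at hqf ⊢; omega
            · exact hlo3 q h' hqf
      · by_cases hc : f > f_end ∧ f - 1 < hi
        · rw [if_pos hc] at hhi1 hhi2
          refine ⟨by omega, ?_, ?_⟩
          · rcases hhi2 with h2 | ⟨q, hq, hq1, hq2⟩
            · exact Or.inr ⟨(f, e), by simp, hc.1, h2⟩
            · exact Or.inr ⟨q, by simp [hq], hq1, hq2⟩
          · intro q hq hqf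
            rcases (List.mem_cons.mp hq) with h' | h'
            · subst h'; omega
            · exact hhi3 q h' hqf
        · rw [if_neg hc] at hhi1 hhi2
          refine ⟨hhi1, ?_, ?_⟩
          · rcases hhi2 with h2 | ⟨q, hq, hq1, hq2⟩
            · exact Or.inl h2
            · exact Or.inr ⟨q, by simp [hq], hq1, hq2⟩
          · intro q hq hqf
            rcases (List.mem_cons.mp hq) with h' | h'
            · subst h'; simp at hqf ⊢; omega
            · exact hhi3 q h' hqf

-- pvScanUp's result is the unique r with: fe ≤ r, everything in (fe, r] free and < f_len,
-- and r+1 aligned or ≥ f_len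
theorem pvScanUp_char (L : List Int) (f_len : Int) :
    ∀ (fuel : Nat) (fe : Int), (f_len - fe).toNat < fuel →
      fe ≤ pvScanUp L f_len fuel fe ∧
      (∀ x : Int, fe < x → x ≤ pvScanUp L f_len fuel fe → x < f_len ∧ x ∉ L) ∧
      (pvScanUp L f_len fuel fe + 1 ≥ f_len ∨ (pvScanUp L f_len fuel fe + 1) ∈ L) := by
  intro fuel
  induction fuel with
  | zero => intro fe h; omega
  | succ n ih =>
    intro fe h
    rw [pvScanUp]
    by_cases hc : fe + 1 < f_len ∧ (fe + 1) ∉ L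
    · rw [if_pos hc]
      obtain ⟨h1, h2, h3⟩ := ih (fe + 1) (by omega)
      refine ⟨by omega, ?_, h3⟩
      intro x hx1 hx2
      by_cases hx : x = fe + 1
      · subst hx; exact ⟨hc.1, hc.2⟩
      · exact h2 x (by omega) hx2
    · rw [if_neg hc]
      refine ⟨le_refl _, ?_, ?_⟩
      · intro x hx1 hx2; omega
      · by_cases hm : (fe + 1) ∈ L
        · exact Or.inr hm
        · left; rcases not_and_or.mp hc with h' | h'
          · omega
          · exact absurd hm (by simpa using h')

theorem pvScanUp_unique (L : List Int) (f_len fe r : Int) (fuel : Nat)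
    (hf : (f_len - fe).toNat < fuel)
    (h1 : fe ≤ r) (h2 : ∀ x : Int, fe < x → x ≤ r → x < f_len ∧ x ∉ L)
    (h3 : r + 1 ≥ f_len ∨ (r + 1) ∈ L) :
    pvScanUp L f_len fuel fe = r := by
  obtain ⟨g1, g2, g3⟩ := pvScanUp_char L f_len fuel fe hf
  set s := pvScanUp L f_len fuel fe with hs
  by_contra hne
  rcases lt_or_gt_of_ne hne with hlt | hgt
  · have := h2 (s + 1) (by omega) (by omega)
    rcases g3 with h' | h' <;> [omega; exact this.2 h']
  · have := g2 (r + 1) (by omega) (by omega)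
    rcases h3 with h' | h' <;> [omega; exact this.2 h']

theorem pvScanDown_char (L : List Int) :
    ∀ (fuel : Nat) (fs : Int), fs.toNat < fuel →
      pvScanDown L fuel fs ≤ fs ∧
      (∀ x : Int, pvScanDown L fuel fs ≤ x → x < fs → 0 ≤ x ∧ x ∉ L) ∧
      (pvScanDown L fuel fs - 1 < 0 ∨ (pvScanDown L fuel fs - 1) ∈ L) := by
  intro fuel
  induction fuel with
  | zero => intro fs h; omega
  | succ n ih =>
    intro fs h
    rw [pvScanDown]
    by_cases hc : fs - 1 ≥ 0 ∧ (fs - 1) ∉ L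
    · rw [if_pos hc]
      obtain ⟨h1, h2, h3⟩ := ih (fs - 1) (by omega)
      refine ⟨by omega, ?_, h3⟩
      intro x hx1 hx2
      by_cases hx : x = fs - 1
      · subst hx; exact ⟨hc.1, hc.2⟩
      · exact h2 x hx1 (by omega)
    · rw [if_neg hc]
      refine ⟨le_refl _, ?_, ?_⟩
      · intro x hx1 hx2; omega
      · by_cases hm : (fs - 1) ∈ L
        · exact Or.inr hm
        · left; rcases not_and_or.mp hc with h' | h'
          · omega
          · exact absurd hm (by simpa using h')

theorem pvScanDown_unique (L : List Int) (fs r : Int) (fuel : Nat)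
    (hf : fs.toNat < fuel)
    (h1 : r ≤ fs) (h2 : ∀ x : Int, r ≤ x → x < fs → 0 ≤ x ∧ x ∉ L)
    (h3 : r - 1 < 0 ∨ (r - 1) ∈ L) :
    pvScanDown L fuel fs = r := by
  obtain ⟨g1, g2, g3⟩ := pvScanDown_char L fuel fs hf
  set s := pvScanDown L fuel fs with hs
  by_contra hne
  rcases lt_or_gt_of_ne hne with hlt | hgt
  · have := g2 (r - 1) (by omega) (by omega)
    rcases h3 with h' | h' <;> [omega; exact this.2 h']
  · have := h2 (s - 1) (by omega) (by omega)
    rcases g3 with h' | h' <;> [omega; exact this.2 h']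

-- membership in the projected alignment list
theorem pv_mem_map_fst (al : List (Int × Int)) (x : Int) :
    x ∈ al.map Prod.fst ↔ ∃ p ∈ al, p.1 = x := by
  simp

-- ===== VERDICT (by name: the statement is the Claim_ definition above) =====
theorem extract_phrase_py_spec : Claim_equal_extract_phrase_py := by
  intro e_start e_end f_start f_end alignment f_len _hDom
  unfold Spec_extract_phrase_py extract_phrase_py extract_phrase_py_alt
  by_cases hend : f_end = -1
  · rw [if_pos hend, if_pos hend]
  · rw [if_neg hend, if_neg hend]
    by_cases hviol : alignment.any (fun p => decide (f_start ≤ p.1 ∧ p.1 ≤ f_end ∧ (p.2 < e_start ∨ p.2 > e_end))) = true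
    · rw [if_pos hviol]
      have : pvScanCaps e_start e_end f_start f_end alignment 0 (f_len - 1) = none :=
        (pvScanCaps_none_iff e_start e_end f_start f_end alignment 0 (f_len - 1)).mpr hviol
      rw [this]
    · rw [if_neg hviol]
      -- no violation: pvScanCaps returns some caps
      rcases hcaps : pvScanCaps e_start e_end f_start f_end alignment 0 (f_len - 1) with _ | ⟨lo, hi⟩
      · exact absurd ((pvScanCaps_none_iff e_start e_end f_start f_end alignment 0 (f_len - 1)).mp hcaps) hviol
      · obtain ⟨⟨hlo1, hlo2, hlo3⟩, ⟨hhi1, hhi2, hhi3⟩⟩ :=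
          pvScanCaps_char e_start e_end f_start f_end alignment 0 (f_len - 1) lo hi hcaps
        set L := alignment.map Prod.fst with hL
        -- B's fe_max equals A's upward scan
        have hup : pvScanUp L f_len ((f_len - f_end).toNat + 1) f_end =
            (if f_end + 1 ≥ f_len then f_end else hi) := by
          by_cases hfl : f_end + 1 ≥ f_len
          · rw [if_pos hfl]
            exact pvScanUp_unique L f_len f_end f_end _ (by omega) (le_refl _)
              (fun x hx1 hx2 => by omega) (Or.inl (by omega))
          · rw [if_neg hfl]
            have hge : f_end ≤ hi := by
              rcases hhi2 with h' | ⟨q, _, hq1, hq2⟩ <;> omega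
            refine pvScanUp_unique L f_len f_end hi _ (by omega) hge ?_ ?_
            · intro x hx1 hx2
              refine ⟨by omega, ?_⟩
              intro hxL
              obtain ⟨q, hq, hqx⟩ := (pv_mem_map_fst alignment x).mp hxL
              have := hhi3 q hq (by omega)
              omega
            · rcases hhi2 with h' | ⟨q, hq, hq1, hq2⟩
              · left; omega
              · right
                exact (pv_mem_map_fst alignment (hi + 1)).mpr ⟨q, hq, by omega⟩
        -- B's fs_min equals A's downward scan
        have hdown : pvScanDown L (f_start.toNat + 1) f_start =
            (if f_start ≤ 0 then f_start else lo) := by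
          by_cases hfs : f_start ≤ 0
          · rw [if_pos hfs]
            exact pvScanDown_unique L f_start f_start _ (by omega) (le_refl _)
              (fun x hx1 hx2 => by omega) (Or.inl (by omega))
          · rw [if_neg hfs]
            have hle : lo ≤ f_start := by
              rcases hlo2 with h' | ⟨q, hq, hq1, hq2⟩ <;> omega
            refine pvScanDown_unique L f_start lo _ (by omega) hle ?_ ?_
            · intro x hx1 hx2
              refine ⟨by omega, ?_⟩
              intro hxL
              obtain ⟨q, hq, hqx⟩ := (pv_mem_map_fst alignment x).mp hxL
              have := hlo3 q hq (by omega)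
              omega
            · rcases hlo2 with h' | ⟨q, hq, hq1, hq2⟩
              · left; omega
              · right
                exact (pv_mem_map_fst alignment (lo - 1)).mpr ⟨q, hq, by omega⟩
        have := pvOuterA_eq e_start e_end f_end L f_len ((f_len - f_end).toNat + 1) (by omega)
          (f_start.toNat + 1) (f_start.toNat + 1) f_start [] (by omega) (by omega)
        rw [hup, hdown] at this
        simpa using this
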